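-- pv_equiv track=rewrite | github.com/kethanareddytukiakula/explain-log | explain_log/explain_log/parser.py | _apply_token_budget
-- ===== SOURCE A (Python) =====
-- def _apply_token_budget(lines: list[str], max_tokens: int):
--     char_budget = max_tokens * 4
--     total_chars = sum(len(l) for l in lines)
--
--     if total_chars <= char_budget:
--         return lines, False
--
--     kept = []
--     chars = 0
--
--     for line in reversed(lines):
--         if chars + len(line) > char_budget:
--             break
--         kept.append(line)
--         chars += len(line)
--
--     return list(reversed(kept)), True
-- ===== SOURCE B (Python) =====
-- def _apply_token_budget(lines: list[str], max_tokens: int):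
--     char_budget = max_tokens * 4
--
--     prefixes = []
--     run = 0
--     for l in lines:
--         prefixes.append(run)
--         run += len(l)
--     total_chars = run
--
--     if total_chars <= char_budget:
--         return lines, False
--
--     drop = sum(1 for p in prefixes if total_chars - p > char_budget)
--     return lines[drop:], True
-- ===== Notes on version B (the rewrite author's own statement) =====
-- stated objective: alternative
-- what changed: B builds the list of prefix character sums in one pass, computes the number of lines to drop as the COUNT of prefixes whose remaining suffix still exceeds the budget, and returns the slice lines[drop:]; A instead walks the reversed list accumulating a kept-list and reverses it back.
import Mathlib
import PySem

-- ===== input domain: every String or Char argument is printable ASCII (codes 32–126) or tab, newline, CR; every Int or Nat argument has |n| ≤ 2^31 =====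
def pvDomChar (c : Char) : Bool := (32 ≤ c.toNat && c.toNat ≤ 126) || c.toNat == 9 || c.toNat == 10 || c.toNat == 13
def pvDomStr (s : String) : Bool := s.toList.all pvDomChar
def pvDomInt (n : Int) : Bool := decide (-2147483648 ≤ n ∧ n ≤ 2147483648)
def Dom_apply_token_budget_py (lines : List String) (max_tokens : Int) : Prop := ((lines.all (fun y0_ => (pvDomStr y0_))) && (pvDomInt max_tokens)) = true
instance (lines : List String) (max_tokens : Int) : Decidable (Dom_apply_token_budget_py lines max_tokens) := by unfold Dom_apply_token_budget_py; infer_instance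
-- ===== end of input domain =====

-- B builds the prefix-sum list, counts how many prefixes leave a suffix still over budget, and slices
-- lines[drop:]; A walks the reversed list accumulating a kept-list and reverses it back (alternative decomposition; return value only).

-- ===== PORT A =====
-- the 'for line in reversed(lines): … break …' loop: kept/chars are the loop state, break returns kept
def pyALoop (budget : Int) : List String → List String → Int → List String
  | [], kept, _ => kept
  | line :: rest, kept, chars =>
      if chars + PySem.Str.len line > budget then kept
      else pyALoop budget rest (kept ++ [line]) (chars + PySem.Str.len line)

def apply_token_budget_py (lines : List String) (max_tokens : Int) : List String × Bool :=
  let char_budget := max_tokens * 4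
  let total_chars := lines.foldl (fun s l => s + PySem.Str.len l) 0
  if total_chars ≤ char_budget then (lines, false)
  else ((pyALoop char_budget lines.reverse [] 0).reverse, true)

-- ===== PORT B =====
-- Source B's prefix pass: 'for l in lines: prefixes.append(run); run += len(l)'
def pyBPfx : List String → List Int → Int → List Int × Int
  | [], ps, run => (ps, run)
  | l :: r, ps, run => pyBPfx r (ps ++ [run]) (run + PySem.Str.len l)

def apply_token_budget_py_alt (lines : List String) (max_tokens : Int) : List String × Bool :=
  let char_budget := max_tokens * 4
  let pr := pyBPfx lines [] 0
  let prefixes := pr.1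
  let total_chars := pr.2
  if total_chars ≤ char_budget then (lines, false)
  else
    -- drop = sum(1 for p in prefixes if total_chars - p > char_budget)
    let drop : Int := prefixes.countP (fun p => decide (total_chars - p > char_budget))
    (PySem.List.slice lines (some drop) none, true)

-- ===== PRECONDITION & SPEC =====
def Spec_apply_token_budget_py (lines : List String) (max_tokens : Int) (out : List String × Bool) : Prop := out = apply_token_budget_py_alt lines max_tokens
instance (lines : List String) (max_tokens : Int) (out : List String × Bool) : Decidable (Spec_apply_token_budget_py lines max_tokens out) := by unfold Spec_apply_token_budget_py; infer_instance

-- ===== CLAIM (what is proved, stated in full; the proofs are below) =====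
def Claim_equal_apply_token_budget_py : Prop := ∀ (lines : List String) (max_tokens : Int), Dom_apply_token_budget_py lines max_tokens → Spec_apply_token_budget_py lines max_tokens (apply_token_budget_py lines max_tokens)

-- ===== LEMMAS AND PROOFS =====

-- sum of lengths, the proof-side recursive form of the foldl
def sumLen : List String → Int
  | [] => 0
  | l :: r => PySem.Str.len l + sumLen r

theorem slen_nonneg (s : String) : 0 ≤ PySem.Str.len s := by
  simp [PySem.Str.len_eq]

theorem sumLen_nonneg (xs : List String) : 0 ≤ sumLen xs := by
  induction xs with
  | nil => simp [sumLen]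
  | cons l r ih => have := slen_nonneg l; simp only [sumLen]; omega

theorem sumLen_append (a b : List String) : sumLen (a ++ b) = sumLen a + sumLen b := by
  induction a with
  | nil => simp [sumLen]
  | cons x xs ih => simp only [List.cons_append, sumLen, ih]; ring

theorem sumLen_reverse (xs : List String) : sumLen xs.reverse = sumLen xs := by
  induction xs with
  | nil => rfl
  | cons x r ih => simp only [List.reverse_cons, sumLen_append, sumLen, ih]; ring

theorem foldl_eq_sumLen (xs : List String) (c : Int) :
    xs.foldl (fun s l => s + PySem.Str.len l) c = c + sumLen xs := by
  induction xs generalizing c with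
  | nil => simp [sumLen]
  | cons l r ih =>
      rw [List.foldl_cons, ih]
      simp only [sumLen]
      ring

-- hh: pyALoop with empty accumulator and the budget shifted by the running chars
def hh (budget : Int) : List String → List String
  | [] => []
  | l :: zs => if PySem.Str.len l > budget then [] else l :: hh (budget - PySem.Str.len l) zs

theorem pyALoop_eq_hh (b : Int) (ys kept : List String) (chars : Int) :
    pyALoop b ys kept chars = kept ++ hh (b - chars) ys := by
  induction ys generalizing kept chars with
  | nil => simp [pyALoop, hh]
  | cons l zs ih =>
      simp only [pyALoop, hh]
      by_cases h : chars + PySem.Str.len l > b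
      · rw [if_pos h, if_pos (show PySem.Str.len l > b - chars by omega)]
        simp
      · rw [if_neg h, if_neg (show ¬ PySem.Str.len l > b - chars by omega), ih]
        have e : b - (chars + PySem.Str.len l) = b - chars - PySem.Str.len l := by ring
        rw [e]
        simp

-- the longest suffix of xs whose total length fits the budget
def sfx (budget : Int) : List String → List String
  | [] => []
  | l :: r => if sumLen (l :: r) ≤ budget then l :: r else sfx budget r

theorem hh_append (bud : Int) (zs : List String) (l : String) :
    hh bud (zs ++ [l]) =
      if sumLen zs + PySem.Str.len l ≤ bud then zs ++ [l] else hh bud zs := by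
  induction zs generalizing bud with
  | nil =>
      simp only [List.nil_append, hh, sumLen]
      by_cases h : PySem.Str.len l > bud
      · rw [if_pos h, if_neg (by omega)]
      · rw [if_neg h, if_pos (by omega)]
  | cons z zs' ih =>
      simp only [List.cons_append, hh, sumLen]
      by_cases h : PySem.Str.len z > bud
      · have h1 := sumLen_nonneg zs'
        have h2 := slen_nonneg l
        rw [if_pos h, if_pos h, if_neg (by omega)]
      · rw [if_neg h, if_neg h, ih]
        by_cases h2 : sumLen zs' + PySem.Str.len l ≤ bud - PySem.Str.len z
        · rw [if_pos h2, if_pos (by omega)]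
        · rw [if_neg h2, if_neg (by omega)]

theorem hh_reverse (bud : Int) (xs : List String) :
    hh bud xs.reverse = (sfx bud xs).reverse := by
  induction xs with
  | nil => simp [hh, sfx]
  | cons l r ih =>
      simp only [List.reverse_cons, sfx, sumLen]
      rw [hh_append, sumLen_reverse]
      by_cases h : sumLen r + PySem.Str.len l ≤ bud
      · rw [if_pos h, if_pos (by omega)]
        simp
      · rw [if_neg h, if_neg (by omega), ih]

-- proof-side form of the prefix-sum list: pfx run xs = [run, run+len x0, …]
def pfx : Int → List String → List Int
  | _, [] => []
  | run, l :: r => run :: pfx (run + PySem.Str.len l) r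

theorem pyBPfx_eq (xs : List String) (ps : List Int) (run : Int) :
    pyBPfx xs ps run = (ps ++ pfx run xs, run + sumLen xs) := by
  induction xs generalizing ps run with
  | nil => simp [pyBPfx, pfx, sumLen]
  | cons l r ih =>
      simp only [pyBPfx, pfx, sumLen, ih, Prod.mk.injEq]
      exact ⟨by simp, by ring⟩

theorem pfx_lb (xs : List String) (run : Int) : ∀ p ∈ pfx run xs, run ≤ p := by
  induction xs generalizing run with
  | nil => simp [pfx]
  | cons l r ih =>
      intro p hp
      simp only [pfx, List.mem_cons] at hp
      rcases hp with h | h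
      · omega
      · have := ih (run + PySem.Str.len l) p h
        have := slen_nonneg l
        omega

-- the drop-count applied to xs yields exactly the longest fitting suffix
theorem drop_count_eq_sfx (xs : List String) (run bud : Int) :
    xs.drop ((pfx run xs).countP (fun p => decide (run + sumLen xs - p > bud))) = sfx bud xs := by
  induction xs generalizing run with
  | nil => simp [pfx, sfx]
  | cons l r ih =>
      have hl := slen_nonneg l
      simp only [pfx, List.countP_cons, sfx]
      by_cases h : sumLen (l :: r) ≤ bud
      · have hhead : ¬ (run + sumLen (l :: r) - run > bud) := by omega
        have htail : (pfx (run + PySem.Str.len l) r).countP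
            (fun p => decide (run + sumLen (l :: r) - p > bud)) = 0 := by
          apply List.countP_eq_zero.mpr
          intro p hp
          have hpl := pfx_lb r (run + PySem.Str.len l) p hp
          have hb : ¬ (run + sumLen (l :: r) - p > bud) := by
            simp only [sumLen] at h ⊢
            omega
          simpa using hb
        rw [htail]
        simp only [decide_eq_true_eq]
        rw [if_neg hhead, if_pos h]
        simp
      · have hhead : run + sumLen (l :: r) - run > bud := by omega
        simp only [decide_eq_true_eq]
        rw [if_pos hhead, if_neg h]
        have e : ∀ p : Int, run + sumLen (l :: r) - p = (run + PySem.Str.len l) + sumLen r - p := by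
          intro p; simp only [sumLen]; ring
        simp only [e]
        rw [List.drop_succ_cons]
        exact ih (run + PySem.Str.len l)

-- ===== VERDICT (by name: the statement is the Claim_ definition above) =====
theorem apply_token_budget_py_spec : Claim_equal_apply_token_budget_py := by
  intro lines max_tokens _
  unfold Spec_apply_token_budget_py apply_token_budget_py apply_token_budget_py_alt
  simp only [foldl_eq_sumLen, zero_add, pyBPfx_eq, List.nil_append]
  by_cases h : sumLen lines ≤ max_tokens * 4
  · rw [if_pos h, if_pos h]
  · rw [if_neg h, if_neg h, pyALoop_eq_hh]
    rw [List.nil_append, sub_zero, hh_reverse, List.reverse_reverse]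
    rw [PySem.List.slice_from_natCast]
    have hc := drop_count_eq_sfx lines 0 (max_tokens * 4)
    simp only [zero_add] at hc
    rw [hc]
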